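-- pv_equiv track=rewrite | github.com/S-Tim/project-euler | problem23.py | is_sum_of_abundants
-- ===== SOURCE A (Python) =====
-- from typing import List
--
-- def is_sum_of_abundants(number: int, abundants: List[int]) -> bool:
--     for x in abundants:
--         for y in abundants:
--             s = x + y
--             if s == number:
--                 return True
--             elif s > number:
--                 break
--     return False
-- ===== SOURCE B (Python) =====
-- def is_sum_of_abundants(number, abundants):
--     seen = set(abundants)
--     return any(number - x in seen for x in abundants)
-- ===== Notes on version B (the rewrite author's own statement) =====
-- stated objective: faster
-- what changed: Replaced the quadratic nested scan by building a hash set once and testing number-x membership for each x.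
-- intended difference: On lists where some pair sums to number but every occurrence of each witness y = number-x is preceded by an element larger than y, A's break (only valid for sorted input) abandons the inner scan early and A wrongly returns False; B returns True, the intended value since such a pair exists. — e.g. on is_sum_of_abundants(4, [3, 2]): A returns false, B returns true
import Mathlib
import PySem

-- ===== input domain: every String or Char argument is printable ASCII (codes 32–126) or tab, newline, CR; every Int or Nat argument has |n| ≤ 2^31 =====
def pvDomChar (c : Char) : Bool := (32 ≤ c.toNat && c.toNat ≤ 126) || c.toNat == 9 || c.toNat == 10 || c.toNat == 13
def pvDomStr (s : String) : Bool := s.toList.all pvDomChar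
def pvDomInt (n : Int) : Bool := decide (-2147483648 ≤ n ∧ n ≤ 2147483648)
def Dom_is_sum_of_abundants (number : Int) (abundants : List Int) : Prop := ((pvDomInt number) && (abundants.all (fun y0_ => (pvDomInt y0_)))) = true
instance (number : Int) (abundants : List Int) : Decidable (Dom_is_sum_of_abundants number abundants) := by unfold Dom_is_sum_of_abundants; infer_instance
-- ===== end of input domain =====

-- B builds a hash set once and tests number-x membership per element (O(n) vs A's O(n^2)); A's sortedness-assuming break can miss pairs on unsorted input, stated as D_ below.

-- ===== PORT A =====
-- inner 'for y in abundants' loop: return True / break / continue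
def isaInnerA (number x : Int) : List Int → Bool
  | [] => false
  | y :: ys =>
    let s := x + y
    if s == number then true
    else if s > number then false
    else isaInnerA number x ys

-- outer 'for x in abundants' loop
def isaOuterA (number : Int) (abundants : List Int) : List Int → Bool
  | [] => false
  | x :: xs => if isaInnerA number x abundants then true else isaOuterA number abundants xs

def is_sum_of_abundants (number : Int) (abundants : List Int) : Bool :=
  isaOuterA number abundants abundants

-- ===== PORT B =====
def is_sum_of_abundants_alt (number : Int) (abundants : List Int) : Bool :=
  let seen := PySem.Set.ofList abundants
  abundants.any (fun x => PySem.Set.contains seen (number - x))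

-- ===== PRECONDITION & SPEC =====
-- On lists where some pair sums to number but every occurrence of each witness y = number-x is
-- preceded by an element larger than y, A's break (only valid for sorted input) abandons the inner
-- scan early and A wrongly returns False; B returns True, the intended value since such a pair exists.
def D_is_sum_of_abundants (number : Int) (abundants : List Int) : Prop :=
  (∃ x ∈ abundants, (number - x) ∈ abundants) ∧
  ∀ x ∈ abundants, (number - x) ∉ abundants.takeWhile (fun z => decide (z ≤ number - x))
instance (number : Int) (abundants : List Int) : Decidable (D_is_sum_of_abundants number abundants) := by unfold D_is_sum_of_abundants; infer_instance

def Spec_is_sum_of_abundants (number : Int) (abundants : List Int) (out : Bool) : Prop :=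
  ¬ D_is_sum_of_abundants number abundants → out = is_sum_of_abundants_alt number abundants
instance (number : Int) (abundants : List Int) (out : Bool) : Decidable (Spec_is_sum_of_abundants number abundants out) := by unfold Spec_is_sum_of_abundants; infer_instance

def pvDiffWitness_is_sum_of_abundants : Int × List Int := (4, [3, 2])
def pvDiffWitnessOut_is_sum_of_abundants : Bool × Bool := (false, true)

-- ===== CLAIM (what is proved, stated in full; the proofs are below) =====
def Claim_unchanged_is_sum_of_abundants : Prop := ∀ (number : Int) (abundants : List Int), Dom_is_sum_of_abundants number abundants → Spec_is_sum_of_abundants number abundants (is_sum_of_abundants number abundants)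
def Claim_changed_is_sum_of_abundants : Prop := Dom_is_sum_of_abundants (pvDiffWitness_is_sum_of_abundants.1) (pvDiffWitness_is_sum_of_abundants.2) ∧ D_is_sum_of_abundants (pvDiffWitness_is_sum_of_abundants.1) (pvDiffWitness_is_sum_of_abundants.2) ∧ is_sum_of_abundants (pvDiffWitness_is_sum_of_abundants.1) (pvDiffWitness_is_sum_of_abundants.2) = pvDiffWitnessOut_is_sum_of_abundants.1 ∧ is_sum_of_abundants_alt (pvDiffWitness_is_sum_of_abundants.1) (pvDiffWitness_is_sum_of_abundants.2) = pvDiffWitnessOut_is_sum_of_abundants.2 ∧ pvDiffWitnessOut_is_sum_of_abundants.1 ≠ pvDiffWitnessOut_is_sum_of_abundants.2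
def Claim_exact_is_sum_of_abundants : Prop := ∀ (number : Int) (abundants : List Int), Dom_is_sum_of_abundants number abundants → D_is_sum_of_abundants number abundants → is_sum_of_abundants number abundants ≠ is_sum_of_abundants_alt number abundants

-- ===== LEMMAS AND PROOFS =====

-- A's inner scan succeeds iff number-x occurs in the ≤(number-x) prefix of the list
theorem isaInnerA_char (number x : Int) (l : List Int) :
    isaInnerA number x l
      = decide ((number - x) ∈ l.takeWhile (fun z => decide (z ≤ number - x))) := by
  induction l with
  | nil => simp [isaInnerA]
  | cons y ys ih =>
    by_cases heq : x + y = number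
    · have hy : y = number - x := by omega
      simp [isaInnerA, List.takeWhile, hy]
    · by_cases hgt : x + y > number
      · have hy : ¬ (y ≤ number - x) := by omega
        simp [isaInnerA, heq, hgt, List.takeWhile, hy]
      · have hy : y ≤ number - x := by omega
        have hne : y ≠ number - x := by omega
        simp only [isaInnerA, hgt]
        simp [List.takeWhile, hy, ih, Ne.symm hne, heq]

theorem isaOuterA_eq_any (number : Int) (full xs : List Int) :
    isaOuterA number full xs = xs.any (fun x => isaInnerA number x full) := by
  induction xs with
  | nil => simp [isaOuterA]
  | cons x xs ih =>
    cases h : isaInnerA number x full <;> simp [isaOuterA, h, ih]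

theorem isaA_char (number : Int) (l : List Int) :
    is_sum_of_abundants number l
      = decide (∃ x ∈ l, (number - x) ∈ l.takeWhile (fun z => decide (z ≤ number - x))) := by
  unfold is_sum_of_abundants
  rw [isaOuterA_eq_any]
  simp only [isaInnerA_char]
  by_cases h : ∃ x ∈ l, (number - x) ∈ l.takeWhile (fun z => decide (z ≤ number - x))
  · simp only [h, decide_true]
    obtain ⟨x, hx, hm⟩ := h
    exact List.any_eq_true.mpr ⟨x, hx, by simpa using hm⟩
  · simp only [h, decide_false]
    rw [List.any_eq_false]
    intro x hx
    simp only [decide_eq_true_eq]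
    intro hm
    exact h ⟨x, hx, hm⟩

theorem isaB_char (number : Int) (l : List Int) :
    is_sum_of_abundants_alt number l = decide (∃ x ∈ l, (number - x) ∈ l) := by
  unfold is_sum_of_abundants_alt
  
  by_cases h : ∃ x ∈ l, (number - x) ∈ l
  · simp only [h, decide_true]
    obtain ⟨x, hx, hm⟩ := h
    exact List.any_eq_true.mpr ⟨x, hx, by
      simpa [PySem.Set.contains_iff, PySem.Set.mem_ofList] using hm⟩
  · simp only [h, decide_false]
    rw [List.any_eq_false]
    intro x hx
    simp only [PySem.Set.contains_iff, PySem.Set.mem_ofList]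
    intro hm
    exact h ⟨x, hx, by simpa using hm⟩

-- ===== VERDICT =====
theorem is_sum_of_abundants_spec : Claim_unchanged_is_sum_of_abundants := by
  intro number l _ hnD
  unfold D_is_sum_of_abundants at hnD
  rw [isaA_char, isaB_char]
  by_cases hB : ∃ x ∈ l, (number - x) ∈ l
  · by_cases hA : ∃ x ∈ l, (number - x) ∈ l.takeWhile (fun z => decide (z ≤ number - x))
    · simp [hA, hB]
    · refine absurd ⟨hB, fun x hx hm => hA ⟨x, hx, hm⟩⟩ hnD
  · have hA : ¬ ∃ x ∈ l, (number - x) ∈ l.takeWhile (fun z => decide (z ≤ number - x)) := by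
      intro ⟨x, hx, hm⟩
      exact hB ⟨x, hx, (List.takeWhile_prefix _).subset hm⟩
    simp [hA, hB]

theorem is_sum_of_abundants_changed : Claim_changed_is_sum_of_abundants := by
  unfold Claim_changed_is_sum_of_abundants; decide

theorem is_sum_of_abundants_tight : Claim_exact_is_sum_of_abundants := by
  intro number l _ hD
  unfold D_is_sum_of_abundants at hD
  rw [isaA_char, isaB_char]
  have hA : ¬ ∃ x ∈ l, (number - x) ∈ l.takeWhile (fun z => decide (z ≤ number - x)) :=
    fun ⟨x, hx, hm⟩ => hD.2 x hx hm
  simp [hA, hD.1]
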